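-- pv_equiv track=rewrite | github.com/GINOXCVIII/SSL_TP_2019 | lexer.py | false_Automaton
-- ===== SOURCE A (Python) =====
-- TRAP_RESULT = "TRAP"
--
-- ACCEPT_RESULT = "ACCEPT"
--
-- NOACCEPT_RESULT = "NOT ACCEPT"
--
-- TRAP = -1
--
-- def false_Automaton(string):
-- 	final_states = 5
-- 	state = 0
-- 	for c in string:
-- 		if state == 0 and c == "f":
-- 			state = 1
-- 		elif state == 1 and c == "a":
-- 			state = 2
-- 		elif state == 2 and c == "l":
-- 			state = 3
-- 		elif state == 3 and c == "s":
-- 			state = 4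
-- 		elif state == 4 and c == "e":
-- 			state = 5
-- 		else:
-- 			state = TRAP
-- 			break
--
-- 	if state == TRAP:
-- 		return TRAP_RESULT
--
-- 	if state == final_states:
-- 		return ACCEPT_RESULT
-- 	else:
-- 		if state != TRAP:
-- 			return NOACCEPT_RESULT
-- ===== SOURCE B (Python) =====
-- TRAP_RESULT = "TRAP"
--
-- ACCEPT_RESULT = "ACCEPT"
--
-- NOACCEPT_RESULT = "NOT ACCEPT"
--
-- TRAP = -1
--
-- def false_Automaton(string):
-- 	# closed form: the automaton accepts exactly "false", says NOT ACCEPT on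
-- 	# proper prefixes of "false", and TRAP otherwise
-- 	if string == "false":
-- 		return ACCEPT_RESULT
-- 	if "false".startswith(string):
-- 		return NOACCEPT_RESULT
-- 	return TRAP_RESULT
-- ===== Notes on version B (the rewrite author's own statement) =====
-- stated objective: simpler
-- what changed: Replaces the per-character state-machine loop with a closed-form comparison: equality with "false" gives ACCEPT, a proper prefix of "false" gives NOT ACCEPT, anything else TRAP.
import Mathlib
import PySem

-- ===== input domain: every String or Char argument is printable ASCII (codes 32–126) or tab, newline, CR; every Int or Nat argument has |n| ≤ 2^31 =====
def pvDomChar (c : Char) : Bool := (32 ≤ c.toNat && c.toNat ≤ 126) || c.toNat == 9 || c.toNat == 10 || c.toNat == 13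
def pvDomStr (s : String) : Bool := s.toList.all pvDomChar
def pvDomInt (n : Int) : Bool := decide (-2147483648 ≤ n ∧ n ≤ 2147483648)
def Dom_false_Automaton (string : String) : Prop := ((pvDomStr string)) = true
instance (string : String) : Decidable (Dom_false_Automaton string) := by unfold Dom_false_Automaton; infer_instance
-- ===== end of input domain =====

-- B replaces A's per-character automaton loop with a closed-form comparison
-- (equal to "false" / proper prefix of "false" / otherwise); simpler, same cost class.

-- ===== PORT A =====
-- the for-loop with its break: recursion over the characters, stopping at TRAP (-1)
def falseLoop : Int → List Char → Int
  | state, [] => state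
  | state, c :: cs =>
    if state = 0 ∧ c = 'f' then falseLoop 1 cs
    else if state = 1 ∧ c = 'a' then falseLoop 2 cs
    else if state = 2 ∧ c = 'l' then falseLoop 3 cs
    else if state = 3 ∧ c = 's' then falseLoop 4 cs
    else if state = 4 ∧ c = 'e' then falseLoop 5 cs
    else (-1)   -- state = TRAP; break

def false_Automaton (string : String) : String :=
  let final_states : Int := 5
  let state : Int := falseLoop 0 string.toList
  if state = -1 then "TRAP"
  else if state = final_states then "ACCEPT"
  else "NOT ACCEPT"   -- A's trailing 'if state != TRAP' is always true here

-- ===== PORT B =====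
def false_Automaton_alt (string : String) : String :=
  if string = "false" then "ACCEPT"
  else if PySem.Str.startswith "false" string then "NOT ACCEPT"
  else "TRAP"

-- ===== PRECONDITION & SPEC =====
def Spec_false_Automaton (string : String) (out : String) : Prop := out = false_Automaton_alt string
instance (string : String) (out : String) : Decidable (Spec_false_Automaton string out) := by unfold Spec_false_Automaton; infer_instance

-- ===== CLAIM (what is proved, stated in full; the proofs are below) =====
def Claim_equal_false_Automaton : Prop := ∀ (string : String), Dom_false_Automaton string → Spec_false_Automaton string (false_Automaton string)

-- ===== LEMMAS AND PROOFS =====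

theorem false_Automaton_key (l : List Char) :
    false_Automaton (String.ofList l) = false_Automaton_alt (String.ofList l) := by
  have htl : (String.ofList l).toList = l := String.toList_ofList (l := l)
  have hfl : ("false" : String).toList = ['f','a','l','s','e'] := by decide
  simp only [false_Automaton, false_Automaton_alt, htl, PySem.Str.startswith_eq, hfl]
  have hs : (String.ofList l = "false") ↔ l = ['f','a','l','s','e'] := by
    constructor
    · intro h; have := congrArg String.toList h; simpa using this
    · intro h; subst h; decide
  simp only [hs]
  rcases l with _ | ⟨c0, l⟩
  · simp [falseLoop, PySem.Chars.startswith_iff]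
  by_cases h0 : c0 = 'f'
  · subst h0
    rcases l with _ | ⟨c1, l⟩
    · simp [falseLoop, PySem.Chars.startswith_iff, List.cons_prefix_cons]
    by_cases h1 : c1 = 'a'
    · subst h1
      rcases l with _ | ⟨c2, l⟩
      · simp [falseLoop, PySem.Chars.startswith_iff, List.cons_prefix_cons]
      by_cases h2 : c2 = 'l'
      · subst h2
        rcases l with _ | ⟨c3, l⟩
        · simp [falseLoop, PySem.Chars.startswith_iff, List.cons_prefix_cons]
        by_cases h3 : c3 = 's'
        · subst h3
          rcases l with _ | ⟨c4, l⟩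
          · simp [falseLoop, PySem.Chars.startswith_iff, List.cons_prefix_cons]
          by_cases h4 : c4 = 'e'
          · subst h4
            rcases l with _ | ⟨c5, l⟩
            · simp [falseLoop, PySem.Chars.startswith_iff]
            · simp [falseLoop, PySem.Chars.startswith_iff, List.cons_prefix_cons, List.prefix_nil]
          · simp [falseLoop, h4, PySem.Chars.startswith_iff, List.cons_prefix_cons]
        · simp [falseLoop, h3, PySem.Chars.startswith_iff, List.cons_prefix_cons]
      · simp [falseLoop, h2, PySem.Chars.startswith_iff, List.cons_prefix_cons]
    · simp [falseLoop, h1, PySem.Chars.startswith_iff, List.cons_prefix_cons]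
  · simp [falseLoop, h0, PySem.Chars.startswith_iff, List.cons_prefix_cons]

-- ===== VERDICT (by name: the statement is the Claim_ definition above) =====
theorem false_Automaton_spec : Claim_equal_false_Automaton := by
  intro s _
  unfold Spec_false_Automaton
  rw [← String.ofList_toList (s := s)]
  exact false_Automaton_key s.toList
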